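-- pv_equiv track=rewrite | github.com/fax77829yz/hook-Android-API-with-FRIDA | seminar_ui.py | correct_syntax
-- ===== SOURCE A (Python) =====
-- def correct_syntax(s, num) :
--   """
--   檢查修改的資料有沒有格式上的錯誤
--   :param s: 要檢查的字串
--   :param num: list中第幾個
--   """
--   if num == 0: return True
--   elif num == 1 and s.isdigit() and len(s) == 15: return True
--   elif num == 2 and s.isdigit() and len(s) == 15: return True
--   elif num == 3 and s.isdigit(): return True
--   elif num == 4 or num == 5 or num == 6 or num == 7 or num == 8 or num == 9: return True
--   elif num == 10 and s.isdigit(): return True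
--   elif num == 11 and '-' in s :
--     tmp = s.split('-')
--     if len(tmp) is 6:
--       for hex in tmp:
--         if len(hex) is not 2 or not is_hex(hex) : return False
--       return True
--
--     return False
--   else :return False
--
-- def is_hex(ch2) :
--   """
--   判斷是否為16進制
--   :param ch2: 要檢查是否為16進制的字串
--   """
--   for i in range(len(ch2)) :
--     if ('0' > ch2[i] or ch2[i] > '9') and ('A' > ch2[i] or ch2[i] > 'F') and \
--       ('a' > ch2[i] or ch2[i] > 'f') :
--       return False
--   return True
-- ===== SOURCE B (Python) =====
-- def correct_syntax(s, num):
--     """Same checks, restructured: grouped num-dispatch; branch 11 validates the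
--     MAC format with one positional scan instead of split-into-parts + loop."""
--     if num == 0 or 4 <= num <= 9:
--         return True
--     if num == 1 or num == 2:
--         return s.isdigit() and len(s) == 15
--     if num == 3 or num == 10:
--         return s.isdigit()
--     if num == 11:
--         # 17 chars: a dash at every index i with i % 3 == 2, a hex digit elsewhere
--         return len(s) == 17 and all(
--             c == '-' if i % 3 == 2 else _is_hex_char(c)
--             for i, c in enumerate(s))
--     return False
--
-- def _is_hex_char(c):
--     return '0' <= c <= '9' or 'A' <= c <= 'F' or 'a' <= c <= 'f'
-- ===== Notes on version B (the rewrite author's own statement) =====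
-- stated objective: alternative
-- what changed: Branches are grouped into a small dispatch and the MAC branch (num==11) is rewritten as a single positional scan (dash at every index i with i%3==2, hex digit elsewhere, length 17) instead of split-on-dash, a 6-part length check and a per-part hex loop.
import Mathlib
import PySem

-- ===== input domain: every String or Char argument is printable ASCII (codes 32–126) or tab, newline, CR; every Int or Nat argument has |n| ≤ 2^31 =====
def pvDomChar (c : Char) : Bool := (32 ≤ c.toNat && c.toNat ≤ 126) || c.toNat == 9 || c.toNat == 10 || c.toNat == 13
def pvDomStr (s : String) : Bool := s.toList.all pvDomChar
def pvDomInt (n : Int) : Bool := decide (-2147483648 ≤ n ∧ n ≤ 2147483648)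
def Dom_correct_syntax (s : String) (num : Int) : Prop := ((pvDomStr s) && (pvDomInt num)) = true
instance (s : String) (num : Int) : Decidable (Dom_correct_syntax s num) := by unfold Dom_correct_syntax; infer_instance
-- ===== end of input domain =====

-- B groups the num-dispatch and replaces branch 11's split-into-parts + per-part loop by a single
-- positional scan of the string (alternative decomposition, same cost); return values agree everywhere.

-- ===== PORT A =====
-- is_hex: loop over the characters, rejecting on the first char outside the three ranges
def pyIsHex : List Char → Bool
  | [] => true
  | c :: rest =>
    if (decide ('0' > c) || decide (c > '9')) && (decide ('A' > c) || decide (c > 'F')) &&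
       (decide ('a' > c) || decide (c > 'f')) then false
    else pyIsHex rest

-- the 'for hex in tmp' loop: first part failing 'len == 2 and is_hex' returns False, else True
def pyPartsLoop : List (List Char) → Bool
  | [] => true
  | p :: ps => if (p.length != 2) || !pyIsHex p then false else pyPartsLoop ps

def correct_syntax (s : String) (num : Int) : Bool :=
  if num == 0 then true
  else if num == 1 && PySem.Str.strIsdigit s && PySem.Str.len s == 15 then true
  else if num == 2 && PySem.Str.strIsdigit s && PySem.Str.len s == 15 then true
  else if num == 3 && PySem.Str.strIsdigit s then true
  else if num == 4 || num == 5 || num == 6 || num == 7 || num == 8 || num == 9 then true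
  else if num == 10 && PySem.Str.strIsdigit s then true
  else if num == 11 && PySem.Str.isIn "-" s then
    -- tmp = s.split('-') (parts kept as List Char; exact: PySem strings live on List Char)
    let tmp := PySem.Chars.splitOn s.toList "-".toList
    if tmp.length == 6 then pyPartsLoop tmp else false
  else false

-- ===== PORT B =====
def hexChar (c : Char) : Bool :=
  (decide ('0' ≤ c) && decide (c ≤ '9')) || (decide ('A' ≤ c) && decide (c ≤ 'F')) ||
  (decide ('a' ≤ c) && decide (c ≤ 'f'))

-- all(c == '-' if i % 3 == 2 else _is_hex_char(c) for i, c in enumerate(s))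
def macScan : List Char → Nat → Bool
  | [], _ => true
  | c :: rest, i => (if i % 3 == 2 then c == '-' else hexChar c) && macScan rest (i + 1)

def correct_syntax_alt (s : String) (num : Int) : Bool :=
  if num == 0 || (decide (4 ≤ num) && decide (num ≤ 9)) then true
  else if num == 1 || num == 2 then PySem.Str.strIsdigit s && PySem.Str.len s == 15
  else if num == 3 || num == 10 then PySem.Str.strIsdigit s
  else if num == 11 then PySem.Str.len s == 17 && macScan s.toList 0
  else false

-- ===== PRECONDITION & SPEC =====
def Spec_correct_syntax (s : String) (num : Int) (out : Bool) : Prop := out = correct_syntax_alt s num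
instance (s : String) (num : Int) (out : Bool) : Decidable (Spec_correct_syntax s num out) := by unfold Spec_correct_syntax; infer_instance

-- ===== CLAIM (what is proved, stated in full; the proofs are below) =====
def Claim_equal_correct_syntax : Prop := ∀ (s : String) (num : Int), Dom_correct_syntax s num → Spec_correct_syntax s num (correct_syntax s num)

-- ===== LEMMAS AND PROOFS =====

-- reference splitter: split on '-' written as direct structural recursion
def dsplit : List Char → List (List Char)
  | [] => [[]]
  | c :: rest => if c = '-' then [] :: dsplit rest else (dsplit rest).modifyHead (c :: ·)

theorem dsplit_exists_cons (cs : List Char) : ∃ h t, dsplit cs = h :: t := by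
  induction cs with
  | nil => exact ⟨[], [], rfl⟩
  | cons c rest ih =>
    obtain ⟨h, t, hht⟩ := ih
    by_cases hc : c = '-'
    · exact ⟨[], dsplit rest, by simp [dsplit, hc]⟩
    · exact ⟨c :: h, t, by simp [dsplit, hc, hht]⟩

theorem go_eq (fuel : Nat) : ∀ (l cur acc : _), l.length ≤ fuel →
    PySem.Chars.splitOn.go ['-'] fuel l cur acc
      = acc.reverse ++ (dsplit l).modifyHead (cur.reverse ++ ·) := by
  induction fuel with
  | zero =>
    intro l cur acc hl
    have : l = [] := by cases l <;> simp_all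
    subst this
    simp [PySem.Chars.splitOn.go, dsplit]
  | succ fuel ih =>
    intro l cur acc hl
    cases l with
    | nil => simp [PySem.Chars.splitOn.go, dsplit]
    | cons c rest =>
      have hr : rest.length ≤ fuel := by simp at hl; omega
      by_cases hc : c = '-'
      · subst hc
        have hstep : PySem.Chars.splitOn.go ['-'] (fuel + 1) ('-' :: rest) cur acc
            = PySem.Chars.splitOn.go ['-'] fuel rest [] (cur.reverse :: acc) := by
          rw [PySem.Chars.splitOn.go]
          simp [List.isPrefixOf]
        rw [hstep, ih rest [] (cur.reverse :: acc) hr]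
        obtain ⟨h, t, hht⟩ := dsplit_exists_cons rest
        simp [dsplit, hht]
      · have hstep : PySem.Chars.splitOn.go ['-'] (fuel + 1) (c :: rest) cur acc
            = PySem.Chars.splitOn.go ['-'] fuel rest (c :: cur) acc := by
          rw [PySem.Chars.splitOn.go]
          have hpre : List.isPrefixOf ['-'] (c :: rest) = false := by
            simp [List.isPrefixOf]
            exact fun h => (hc h.symm).elim
          simp [hpre]
        rw [hstep, ih rest (c :: cur) acc hr]
        obtain ⟨h, t, hht⟩ := dsplit_exists_cons rest
        simp [dsplit, hc, hht]

theorem splitOn_eq_dsplit (cs : List Char) : PySem.Chars.splitOn cs ['-'] = dsplit cs := by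
  unfold PySem.Chars.splitOn
  rw [go_eq (cs.length + 1) cs [] [] (by omega)]
  obtain ⟨h, t, hht⟩ := dsplit_exists_cons cs
  simp [hht]

theorem hexBridge (c : Char) :
    ((decide ('0' > c) || decide (c > '9')) && (decide ('A' > c) || decide (c > 'F')) &&
     (decide ('a' > c) || decide (c > 'f'))) = !hexChar c := by
  unfold hexChar
  simp [← decide_not]

theorem pyIsHex_pair (a b : Char) : pyIsHex [a, b] = (hexChar a && hexChar b) := by
  simp only [pyIsHex, hexBridge]
  cases hexChar a <;> cases hexChar b <;> simp

theorem macScan_add3 (cs : List Char) : ∀ i, macScan cs (i + 3) = macScan cs i := by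
  induction cs with
  | nil => intro i; rfl
  | cons c rest ih =>
    intro i
    show ((if (i + 3) % 3 == 2 then c == '-' else hexChar c) && macScan rest (i + 3 + 1)) = _
    have h3 : (i + 3) % 3 = i % 3 := Nat.add_mod_right i 3
    have h4 : i + 3 + 1 = (i + 1) + 3 := by omega
    rw [h3, h4, ih (i + 1)]
    rfl

theorem mac_main (cs : List Char) (k : Nat) :
    (((dsplit cs).length == k + 1) && pyPartsLoop (dsplit cs))
      = (decide (cs.length = 3 * k + 2) && macScan cs 0) := by
  match cs with
  | [] => simp [dsplit, pyPartsLoop]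
  | [a] =>
    by_cases ha : a = '-' <;> simp [dsplit, pyPartsLoop, ha]
  | [a, b] =>
    by_cases ha : a = '-'
    · simp [dsplit, pyPartsLoop, ha, macScan, show hexChar '-' = false by decide]
    · by_cases hb : b = '-'
      · simp [dsplit, pyPartsLoop, ha, hb, macScan, show hexChar '-' = false by decide]
      · simp [dsplit, pyPartsLoop, ha, hb, macScan, pyIsHex_pair]
        cases k with
        | zero => simp
        | succ k' => simp
  | a :: b :: c :: rest =>
    by_cases ha : a = '-'
    · simp [dsplit, pyPartsLoop, ha, macScan, show hexChar '-' = false by decide]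
    · by_cases hb : b = '-'
      · simp [dsplit, pyPartsLoop, ha, hb, macScan, show hexChar '-' = false by decide]
      · by_cases hc : c = '-'
        · -- dsplit = [a,b] :: dsplit rest
          obtain ⟨h, t, hht⟩ := dsplit_exists_cons rest
          have hds : dsplit (a :: b :: c :: rest) = [a, b] :: dsplit rest := by
            simp [dsplit, ha, hb, hc]
          cases k with
          | zero =>
            have hL : ((dsplit rest).length + 1 == 0 + 1) = false := by simp [hht]
            simp [hds, hL]
          | succ k' =>
            have IH := mac_main rest k'
            have hm3 : macScan rest 3 = macScan rest 0 := by
              have := macScan_add3 rest 0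
              simpa using this
            have hlen : (rest.length + 3 = 3 * (k' + 1) + 2) ↔ (rest.length = 3 * k' + 2) := by omega
            simp only [macScan, hc]
            cases hA : hexChar a <;> cases hB : hexChar b <;>
              simp_all [pyPartsLoop, pyIsHex_pair, Bool.and_comm, Bool.and_left_comm]
        · -- first part has length ≥ 3 on the A side; scan fails at index 2 on the B side
          obtain ⟨h, t, hht⟩ := dsplit_exists_cons rest
          have hds : dsplit (a :: b :: c :: rest) = (a :: b :: c :: h) :: t := by
            simp [dsplit, ha, hb, hc, hht]
          have hcb : (c == '-') = false := by simp [hc]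
          simp [hds, pyPartsLoop, macScan, hcb]

theorem macScan_false_of_no_dash (cs : List Char) (h3 : 3 ≤ cs.length) (hnd : '-' ∉ cs) :
    macScan cs 0 = false := by
  match cs with
  | a :: b :: c :: rest =>
    have hc : (c == '-') = false := by
      simp only [beq_eq_false_iff_ne, ne_eq]
      intro h; exact hnd (by simp [h])
    simp [macScan, hc]

theorem branch11 (s : String) :
    (if PySem.Str.isIn "-" s then
        (if (PySem.Chars.splitOn s.toList "-".toList).length == 6 then
          pyPartsLoop (PySem.Chars.splitOn s.toList "-".toList) else false)
      else false)
      = (PySem.Str.len s == 17 && macScan s.toList 0) := by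
  have hsep : ("-" : String).toList = ['-'] := rfl
  have hmm := mac_main s.toList 5
  have hlen : ((PySem.Str.len s == 17) : Bool) = decide (s.toList.length = 3 * 5 + 2) := by
    show ((s.toList.length : Int) == 17) = decide (s.toList.length = 3 * 5 + 2)
    by_cases h : s.toList.length = 17
    · rw [h]; rfl
    · have h2 : ((s.toList.length : Int) == 17) = false := by
        simp
        exact_mod_cast h
      rw [h2, decide_eq_false (by omega)]
  cases hIn : PySem.Str.isIn "-" s with
  | true =>
    rw [hsep, splitOn_eq_dsplit, hlen, ← hmm]
    simp only [if_true]
    cases hL : ((dsplit s.toList).length == 5 + 1) <;> simp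
  | false =>
    have hnd : '-' ∉ s.toList := by
      intro hm
      obtain ⟨l1, l2, hl⟩ := List.append_of_mem hm
      have hinf : ("-" : String).toList <:+: s.toList := ⟨l1, l2, by simp [hl, hsep]⟩
      have := (PySem.Str.isIn_iff_infix "-" s).mpr hinf
      rw [hIn] at this
      cases this
    cases hL : ((PySem.Str.len s == 17) : Bool) with
    | false => simp
    | true =>
      have hlen17 : s.toList.length = 17 := by
        rw [hlen] at hL
        simpa using hL
      rw [macScan_false_of_no_dash s.toList (by omega) hnd]
      simp

-- ===== VERDICT (by name: the statement is the Claim_ definition above) =====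
theorem correct_syntax_spec : Claim_equal_correct_syntax := by
  intro s num _
  show correct_syntax s num = correct_syntax_alt s num
  by_cases h0 : num = 0
  · subst h0; simp [correct_syntax, correct_syntax_alt]
  by_cases h1 : num = 1
  · subst h1
    simp [correct_syntax, correct_syntax_alt]
    cases hD : PySem.Str.strIsdigit s <;> cases hL : (PySem.Str.len s == 15) <;> simp_all
  by_cases h2 : num = 2
  · subst h2
    simp [correct_syntax, correct_syntax_alt]
    cases hD : PySem.Str.strIsdigit s <;> cases hL : (PySem.Str.len s == 15) <;> simp_all
  by_cases h3 : num = 3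
  · subst h3
    simp [correct_syntax, correct_syntax_alt]
  by_cases h4 : num = 4
  · subst h4; simp [correct_syntax, correct_syntax_alt]
  by_cases h5 : num = 5
  · subst h5; simp [correct_syntax, correct_syntax_alt]
  by_cases h6 : num = 6
  · subst h6; simp [correct_syntax, correct_syntax_alt]
  by_cases h7 : num = 7
  · subst h7; simp [correct_syntax, correct_syntax_alt]
  by_cases h8 : num = 8
  · subst h8; simp [correct_syntax, correct_syntax_alt]
  by_cases h9 : num = 9
  · subst h9; simp [correct_syntax, correct_syntax_alt]
  by_cases h10 : num = 10
  · subst h10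
    simp [correct_syntax, correct_syntax_alt]
  by_cases h11 : num = 11
  · subst h11
    simp only [correct_syntax, correct_syntax_alt]
    norm_num
    simpa using branch11 s
  · have h49 : (decide ((4:Int) ≤ num) && decide (num ≤ 9)) = false := by
      by_cases ha : (4:Int) ≤ num
      · have hb : ¬ num ≤ 9 := by omega
        simp [hb]
      · simp [ha]
    simp [correct_syntax, correct_syntax_alt, h0, h1, h2, h3, h4, h5, h6, h7, h8, h9, h10, h11, h49]
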